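-- pv_equiv track=rewrite | github.com/khaldyAseel/Switch1-Program | question_solving/ex4.py | return_max_char
-- ===== SOURCE A (Python) =====
-- def return_max_char(str):
--     char_count = {}
--     char_order = []
--
--     for char in str:
--         if char not in char_count:
--             char_count[char] = 1
--             char_order.append(char)
--         else:
--             char_count[char] += 1
--
--     max_count = 0
--     max_char = None
--     for char in char_order:
--         if char_count[char] > max_count:
--             max_count = char_count[char]
--             max_char = char
--     return max_char
-- ===== SOURCE B (Python) =====
-- def return_max_char(str):
--     seen = []
--     max_count = 0
--     max_char = None
--     for char in str:
--         if char not in seen: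
--             seen.append(char)
--             c = str.count(char)
--             if c > max_count:
--                 max_count = c
--                 max_char = char
--     return max_char
-- ===== Notes on version B (the rewrite author's own statement) =====
-- stated objective: alternative
-- what changed: B replaces A's two-pass build-a-frequency-dict-then-scan-the-order-list strategy with a single pass that keeps a list of characters already encountered and updates the running maximum at each first occurrence using str.count.
import Mathlib
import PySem

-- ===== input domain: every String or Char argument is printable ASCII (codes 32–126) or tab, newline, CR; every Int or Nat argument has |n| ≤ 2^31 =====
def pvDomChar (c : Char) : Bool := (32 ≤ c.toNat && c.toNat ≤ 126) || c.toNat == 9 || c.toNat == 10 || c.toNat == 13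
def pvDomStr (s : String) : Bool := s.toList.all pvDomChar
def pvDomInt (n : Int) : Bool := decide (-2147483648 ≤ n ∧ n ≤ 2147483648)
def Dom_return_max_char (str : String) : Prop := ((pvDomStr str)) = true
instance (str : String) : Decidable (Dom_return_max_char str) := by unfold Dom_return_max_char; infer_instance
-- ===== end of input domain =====

-- B drops A's frequency dictionary and second pass: one pass over the string keeps a 'seen' list and
-- updates the running maximum with str.count at each first occurrence (objective: alternative, same result).

-- ===== PORT A =====
def return_max_char (str : String) : Option String :=
  let st := str.toList.foldl
    (fun (st : PySem.Dict Char Int × List Char) char =>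
      if st.1.contains char = false then (st.1.insert char 1, st.2 ++ [char])
      else (st.1.insert char (st.1.getD char 0 + 1), st.2))
    (PySem.Dict.empty, [])
  let res := st.2.foldl
    (fun (acc : Int × Option String) char =>
      if st.1.getD char 0 > acc.1 then (st.1.getD char 0, some (String.ofList [char])) else acc)
    ((0 : Int), (none : Option String))
  res.2

-- ===== PORT B =====
def return_max_char_alt (str : String) : Option String :=
  let st := str.toList.foldl
    (fun (st : List Char × Int × Option String) char =>
      if char ∈ st.1 then st
      else
        let c : Int := (PySem.Str.count str (String.ofList [char]) : Int)
        if c > st.2.1 then (st.1 ++ [char], c, some (String.ofList [char]))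
        else (st.1 ++ [char], st.2.1, st.2.2))
    (([] : List Char), (0 : Int), (none : Option String))
  st.2.2

-- ===== PRECONDITION & SPEC =====
def Spec_return_max_char (str : String) (out : Option String) : Prop := out = return_max_char_alt str
instance (str : String) (out : Option String) : Decidable (Spec_return_max_char str out) := by unfold Spec_return_max_char; infer_instance

-- ===== CLAIM (what is proved, stated in full; the proofs are below) =====
def Claim_equal_return_max_char : Prop := ∀ (str : String), Dom_return_max_char str → Spec_return_max_char str (return_max_char str)

-- ===== LEMMAS AND PROOFS =====

-- single-character substring count is element count
theorem pv_go_single (c : Char) : ∀ (fuel : Nat) (l : List Char) (acc : Nat), l.length ≤ fuel →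
    PySem.Chars.count.go [c] fuel l acc = acc + l.count c := by
  intro fuel
  induction fuel with
  | zero => intro l acc h; cases l with
    | nil => simp [PySem.Chars.count.go]
    | cons a t => simp at h
  | succ n ih => intro l acc h; cases l with
    | nil => simp [PySem.Chars.count.go]
    | cons a t =>
      rw [PySem.Chars.count.go]
      by_cases hc : a = c
      · subst hc
        simp [List.isPrefixOf, ih t (acc + 1) (by simpa using h)]
        omega
      · have hp : List.isPrefixOf [c] (a :: t) = false := by
          simp [List.isPrefixOf]; exact fun h => absurd h.symm hc
        simp [hp, ih t acc (by simpa using h), hc]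

theorem pv_count_single (l : List Char) (c : Char) : PySem.Chars.count l [c] = l.count c := by
  simp [PySem.Chars.count]
  simpa using pv_go_single c l.length l 0 (le_refl _)

-- the characters of l not yet in s, first occurrences in order
def pvNew : List Char → List Char → List Char
  | [], _ => []
  | c :: l, s => if c ∈ s then pvNew l s else c :: pvNew l (s ++ [c])

theorem pv_foldl_add (l : List Char) : ∀ s : List Char,
    l.foldl PySem.Set.add s = s ++ pvNew l s := by
  induction l with
  | nil => intro s; simp [pvNew]
  | cons c l ih =>
    intro s
    by_cases h : c ∈ s
    · simp [pvNew, h, PySem.Set.add, List.contains_iff_mem.mpr h, ih]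
    · have hc : s.contains c = false := by
        simpa using h
      simp [pvNew, h, PySem.Set.add, hc, ih]

-- A's first loop, split into its dictionary and its order-list component
theorem pv_loopA (l : List Char) :
    ∀ (d : PySem.Dict Char Int) (o : List Char), (∀ c, d.contains c = o.contains c) →
    l.foldl
      (fun (st : PySem.Dict Char Int × List Char) char =>
        if st.1.contains char = false then (st.1.insert char 1, st.2 ++ [char])
        else (st.1.insert char (st.1.getD char 0 + 1), st.2)) (d, o)
      = (l.foldl (fun d c => d.insert c (d.getD c 0 + 1)) d, l.foldl PySem.Set.add o) := by
  induction l with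
  | nil => intro d o h; simp
  | cons a l ih =>
    intro d o h
    by_cases hc : d.contains a = false
    · have hoa : o.contains a = false := (h a).symm.trans hc
      have h0 : d.getD a 0 = 0 := PySem.Dict.getD_of_not_contains d 0 hc
      have hins : d.insert a 1 = d.insert a (d.getD a 0 + 1) := by rw [h0]; norm_num
      have hno : a ∉ o := by simpa using hoa
      have hadd : PySem.Set.add o a = o ++ [a] := by
        simp [PySem.Set.add, hno]
      simp only [List.foldl_cons, hc, if_true, hins]
      rw [ih (d.insert a (d.getD a 0 + 1)) (o ++ [a]) ?_, hadd]
      intro c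
      by_cases hca : c = a
      · subst hca
        simp [PySem.Dict.contains_insert, List.contains_append]
      · simp [PySem.Dict.contains_insert, List.contains_append, hca, h c]
    · have hc' : d.contains a = true := by simpa using hc
      have hoa : o.contains a = true := (h a).symm.trans hc'
      have hyo : a ∈ o := by simpa using hoa
      have hadd : PySem.Set.add o a = o := by
        simp [PySem.Set.add, hyo]
      simp only [List.foldl_cons, hc', if_false, Bool.true_eq_false]
      rw [ih (d.insert a (d.getD a 0 + 1)) o ?_, hadd]
      intro c
      by_cases hca : c = a
      · subst hca
        simp [PySem.Dict.contains_insert, hyo]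
      · simp [PySem.Dict.contains_insert, hca, h c]

-- B's loop: the seen list accumulates Set.add, the running max folds over the new first occurrences
theorem pv_loopB (l0 : List Char) (str : String) (hs : str.toList = l0) (l : List Char) :
    ∀ (s : List Char) (p : Int × Option String),
    l.foldl
      (fun (st : List Char × Int × Option String) char =>
        if char ∈ st.1 then st
        else
          let c : Int := (PySem.Str.count str (String.ofList [char]) : Int)
          if c > st.2.1 then (st.1 ++ [char], c, some (String.ofList [char]))
          else (st.1 ++ [char], st.2.1, st.2.2)) (s, p)
      = (l.foldl PySem.Set.add s,
         (pvNew l s).foldl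
           (fun (acc : Int × Option String) c =>
             if ((l0.count c : Int)) > acc.1 then ((l0.count c : Int), some (String.ofList [c])) else acc) p) := by
  induction l with
  | nil => intro s p; simp [pvNew]
  | cons a l ih =>
    intro s p
    have hcnt : (PySem.Str.count str (String.ofList [a]) : Int) = (l0.count a : Int) := by
      rw [PySem.Str.count_eq, hs]
      norm_cast
      simpa using pv_count_single l0 a
    by_cases h : a ∈ s
    · have hadd : PySem.Set.add s a = s := by
        simp [PySem.Set.add, h]
      have hnew : pvNew (a :: l) s = pvNew l s := by
        simp only [pvNew, if_pos h]
      simp only [List.foldl_cons, if_pos h, hnew, hadd, ih]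
    · have hadd : PySem.Set.add s a = s ++ [a] := by
        simp [PySem.Set.add, h]
      have hnew : pvNew (a :: l) s = a :: pvNew l (s ++ [a]) := by
        simp only [pvNew, if_neg h]
      simp only [List.foldl_cons, if_neg h, hnew, hcnt]
      by_cases hgt : (l0.count a : Int) > p.1
      · simp only [if_pos hgt, ih, hadd]
      · simp only [if_neg hgt, ih, hadd]

-- ===== VERDICT (by name: the statement is the Claim_ definition above) =====
theorem return_max_char_spec : Claim_equal_return_max_char := by
  intro str _
  unfold Spec_return_max_char return_max_char return_max_char_alt
  rw [pv_loopA str.toList PySem.Dict.empty [] (by intro c; simp)]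
  rw [pv_loopB str.toList str rfl str.toList [] (0, none)]
  simp only [pv_foldl_add, List.nil_append]
  have hgetD : ∀ c : Char,
      (str.toList.foldl (fun d c => d.insert c (d.getD c 0 + 1)) PySem.Dict.empty).getD c 0
        = (str.toList.count c : Int) := by
    intro c
    rw [PySem.Dict.getD_foldl_insert_add_one]
    simp [PySem.Dict.getD_empty]
  simp only [hgetD]
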